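-- pv_equiv track=rewrite | github.com/ProfessorRex/HoennSafariZone | HSZC.py | new_pats
-- ===== SOURCE A (Python) =====
-- def new_pats(t_balls, start_p='T'):
--     balls = t_balls - start_p.count('L')
--     pats = []
--     for x in range(0, balls-2):
--         num = balls - x
--         max_tll = int(num/2)
--         min_tllll = int(num/4)
--         if min_tllll == 0:
--             min_tllll = 1
--         for t in range(min_tllll, max_tll + 1):
--             s = '2' * (t)
--             max_range = int(s, base=3)
--             for i in range(0, max_range + 1):
--                 pat = start_p
--                 tern = ternary(i)
--                 bin_p = str(tern)
--                 if len(bin_p) < t: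
--                     bin_p = '0' * (t - len(bin_p)) + bin_p
--                 p_sum = 0
--                 for p in bin_p:
--                     if p == '0':
--                         p_sum += 2
--                         pat = pat + 'TLL'
--                     elif p == '1':
--                         p_sum += 3
--                         pat = pat + 'TLLL'
--                     elif p == '2':
--                         p_sum += 4
--                         pat = pat + 'TLLLL'
--                 p_sum += x
--                 if p_sum == balls:
--                     pat = pat + 'L' * x
--                     pats.append(pat)
--     pats = list(dict.fromkeys(pats))
--     return pats
--
-- def ternary (n):
--     if n == 0:
--         return '0'
--     nums = []
--     while n:
--         n, r = divmod(n, 3)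
--         nums.append(str(r))
--     return ''.join(reversed(nums))
-- ===== SOURCE B (Python) =====
-- def new_pats(t_balls, start_p='T'):
--     balls = t_balls - start_p.count('L')
--     blocks = ('TLL', 'TLLL', 'TLLLL')
--     out = []
--     seen = set()
--     for x in range(0, balls - 2):
--         num = balls - x
--         for t in range(1, num // 2 + 1):
--             # grow block-digit prefixes left to right, keeping only prefixes whose
--             # remaining weight is still achievable with the blocks left (ternary-lex order)
--             level = [((), num)]
--             for k in range(t, 0, -1):
--                 nxt = []
--                 for digs, rem in level:
--                     for d in range(3):
--                         r = rem - (2 + d)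
--                         if 2 * (k - 1) <= r <= 4 * (k - 1):
--                             nxt.append((digs + (d,), r))
--                 level = nxt
--             for digs, _ in level:
--                 pat = start_p + ''.join(blocks[d] for d in digs) + 'L' * x
--                 if pat not in seen:
--                     seen.add(pat)
--                     out.append(pat)
--     return out
-- ===== Notes on version B (the rewrite author's own statement) =====
-- stated objective: faster
-- what changed: A enumerates all 3^t ternary numerals for every block count t and keeps the few whose digit-weights sum to the target; B breadth-first-grows only block-composition prefixes whose remaining weight is still reachable (exactly the valid compositions, in the same ternary-lex order) and deduplicates online with a set instead of dict.fromkeys at the end. Intended as faster; a timing run measured 35.7x at the largest size where A still finishes (n=64; A times out at n=64 on some inputs where B returns), while at n=256 the result list itself is too large for either program.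
import Mathlib
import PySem

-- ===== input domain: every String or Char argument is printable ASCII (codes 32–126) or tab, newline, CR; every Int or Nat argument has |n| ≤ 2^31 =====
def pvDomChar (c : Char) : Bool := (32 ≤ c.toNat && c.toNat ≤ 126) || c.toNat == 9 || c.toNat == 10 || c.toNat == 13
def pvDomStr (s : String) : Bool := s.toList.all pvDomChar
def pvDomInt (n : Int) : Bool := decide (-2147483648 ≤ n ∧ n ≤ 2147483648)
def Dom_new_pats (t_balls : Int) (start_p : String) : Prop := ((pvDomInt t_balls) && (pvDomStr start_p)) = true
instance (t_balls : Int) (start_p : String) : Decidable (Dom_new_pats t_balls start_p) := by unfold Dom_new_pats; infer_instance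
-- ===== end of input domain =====

-- B re-implements A's brute-force scan of all 3^t ternary numerals as a pruned breadth-first
-- enumeration of only the block-compositions that can still reach the target weight (same output).

-- ===== PORT A =====
-- helper `ternary`: exact for n ≥ 0, the only calls A makes (i ranges over 0..max_range)
def ternaryGo (n : Nat) (nums : List String) : List String :=
  if h : n = 0 then nums
  else ternaryGo (n / 3) (nums ++ [PySem.Int.toStr ((n % 3 : Nat) : Int)])
decreasing_by exact Nat.div_lt_self (Nat.pos_of_ne_zero h) (by norm_num)

def ternary (n : Nat) : String :=
  if n = 0 then "0"
  else PySem.Str.join "" (ternaryGo n []).reverse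

-- int(s, base=3): Horner fold, exact on strings of digits 0-2 (the only calls: s = '2'*t);
-- (PySem.Int.ofCharsBase? computes the same value but its digit fold is private, blocking the needed induction)
def int3 (s : List Char) : Int :=
  s.foldl (fun acc c => acc * 3 + ((c.toNat : Int) - 48)) 0

def new_pats (t_balls : Int) (start_p : String) : List String :=
  let balls : Int := t_balls - (PySem.Str.count start_p "L" : Int)
  let pats : List String :=
    (PySem.List.pyRange 0 (balls - 2) 1).foldl (fun pats x =>
      let num := balls - x
      let max_tll := PySem.Int.truncdiv num 2    -- int(num/2), exact for |num| < 2^53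
      let min0 := PySem.Int.truncdiv num 4       -- int(num/4)
      let min_tllll := if min0 = 0 then 1 else min0
      (PySem.List.pyRange min_tllll (max_tll + 1) 1).foldl (fun pats t =>
        let s : List Char := List.replicate t.toNat '2'   -- '2' * t
        let max_range := int3 s
        (PySem.List.pyRange 0 (max_range + 1) 1).foldl (fun pats i =>
          let tern := ternary i.toNat                     -- i ≥ 0 on this range
          let bin_p := tern.toList
          let bin_p := if (bin_p.length : Int) < t then
              List.replicate ((t : Int) - (bin_p.length : Int)).toNat '0' ++ bin_p else bin_p
          let st := bin_p.foldl (fun (st : String × Int) p =>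
            if p = '0' then (st.1 ++ "TLL", st.2 + 2)
            else if p = '1' then (st.1 ++ "TLLL", st.2 + 3)
            else if p = '2' then (st.1 ++ "TLLLL", st.2 + 4)
            else st) (start_p, (0 : Int))
          if st.2 + x = balls then pats ++ [st.1 ++ String.mk (List.replicate x.toNat 'L')] else pats
        ) pats) pats) []
  PySem.List.dedup pats

-- ===== PORT B =====
def new_pats_alt (t_balls : Int) (start_p : String) : List String :=
  let balls : Int := t_balls - (PySem.Str.count start_p "L" : Int)
  let blocks : List String := ["TLL", "TLLL", "TLLLL"]
  let res :=
    (PySem.List.pyRange 0 (balls - 2) 1).foldl (fun (acc : List String × PySem.Set String) x =>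
      let num := balls - x
      (PySem.List.pyRange 1 (PySem.Int.floordiv num 2 + 1) 1).foldl (fun acc t =>
        let level : List (List Int × Int) := [([], num)]
        let level := (PySem.List.pyRange t 0 (-1)).foldl (fun level k =>
          level.foldl (fun nxt dr =>
            (PySem.List.pyRange 0 3 1).foldl (fun nxt d =>
              let r := dr.2 - (2 + d)
              if 2 * (k - 1) ≤ r ∧ r ≤ 4 * (k - 1) then nxt ++ [(dr.1 ++ [d], r)] else nxt)
              nxt) []) level
        level.foldl (fun (acc : List String × PySem.Set String) dr =>
          -- blocks[d]: d is always 0, 1 or 2 here, so the "" default is never used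
          let pat := start_p ++ PySem.Str.join "" (dr.1.map (fun d => PySem.List.pyGetD blocks d "")) ++ String.mk (List.replicate x.toNat 'L')
          if PySem.Set.contains acc.2 pat then acc else (acc.1 ++ [pat], PySem.Set.add acc.2 pat)) acc
      ) acc) ([], PySem.Set.empty)
  res.1

-- ===== PRECONDITION & SPEC =====
def Spec_new_pats (t_balls : Int) (start_p : String) (out : List String) : Prop := out = new_pats_alt t_balls start_p
instance (t_balls : Int) (start_p : String) (out : List String) : Decidable (Spec_new_pats t_balls start_p out) := by unfold Spec_new_pats; infer_instance

-- ===== CLAIM (what is proved, stated in full; the proofs are below) =====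
def Claim_equal_new_pats : Prop := ∀ (t_balls : Int) (start_p : String), Dom_new_pats t_balls start_p → Spec_new_pats t_balls start_p (new_pats t_balls start_p)

-- ===== LEMMAS AND PROOFS =====

-- ---------- proof-side abstract objects ----------

def digChar (d : Int) : Char := if d = 0 then '0' else if d = 1 then '1' else '2'

def ext1 (s : List Int) : List (List Int) := [s ++ [0], s ++ [1], s ++ [2]]

def stepN (L : List (List Int)) : List (List Int) := L.flatMap ext1

def allT (t : Nat) : List (List Int) := stepN^[t] [[]]

def wsum (s : List Int) : Int := (s.map (· + 2)).sum

def gen (num : Int) (t : Nat) : List (List Int) := (allT t).filter (fun s => decide (wsum s = num))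

def joinBlocks (ds : List Int) : String :=
  PySem.Str.join "" (ds.map (fun d => PySem.List.pyGetD ["TLL", "TLLL", "TLLLL"] d ""))

def itemOf (start_p : String) (x : Int) (ds : List Int) : String :=
  start_p ++ joinBlocks ds ++ String.mk (List.replicate x.toNat 'L')

def items (start_p : String) (num x : Int) (t : Nat) : List String :=
  (gen num t).map (itemOf start_p x)

def itemsX (start_p : String) (balls x : Int) : List String :=
  (PySem.List.pyRange 1 (PySem.Int.floordiv (balls - x) 2 + 1) 1).flatMap
    (fun t => items start_p (balls - x) x t.toNat)

def big (start_p : String) (balls : Int) : List String :=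
  (PySem.List.pyRange 0 (balls - 2) 1).flatMap (fun x => itemsX start_p balls x)

def canon : Nat → Nat → List Int
  | 0, _ => []
  | t + 1, i => canon t (i / 3) ++ [((i % 3 : Nat) : Int)]

def dlsb (n : Nat) : List Int :=
  if h : n = 0 then [] else ((n % 3 : Nat) : Int) :: dlsb (n / 3)
decreasing_by exact Nat.div_lt_self (Nat.pos_of_ne_zero h) (by norm_num)

def pairup (num : Int) (s : List Int) : List Int × Int := (s, num - wsum s)

def feasB (num k : Int) (s : List Int) : Bool :=
  decide (2 * k ≤ num - wsum s ∧ num - wsum s ≤ 4 * k)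

def updItem (acc : List String × PySem.Set String) (p : String) : List String × PySem.Set String :=
  if PySem.Set.contains acc.2 p then acc else (acc.1 ++ [p], PySem.Set.add acc.2 p)

-- ---------- generic fold glue ----------

theorem foldl_app_of_mem {a b : Type} (l : List a) (f : List b -> a -> List b) (g : a -> List b)
    (h : forall acc x, x ∈ l -> f acc x = acc ++ g x) (acc : List b) :
    l.foldl f acc = acc ++ l.flatMap g := by
  induction l generalizing acc with
  | nil => simp
  | cons b l ih =>
    simp only [List.foldl_cons, List.flatMap_cons]
    rw [h acc b (by simp), ih (fun acc x hx => h acc x (by simp [hx]))]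
    simp

theorem foldl_cat_of_mem {a b c : Type} (l : List a) (f : c -> a -> c) (g : a -> List b)
    (u : c -> b -> c) (h : forall acc x, x ∈ l -> f acc x = (g x).foldl u acc) (init : c) :
    l.foldl f init = (l.flatMap g).foldl u init := by
  induction l generalizing init with
  | nil => simp
  | cons b l ih =>
    simp only [List.foldl_cons, List.flatMap_cons, List.foldl_append]
    rw [h init b (by simp), ih (fun acc x hx => h acc x (by simp [hx]))]

theorem dedup_fold (l : List String) (s : PySem.Set String) :
    l.foldl updItem (s, s) = (l.foldl PySem.Set.add s, l.foldl PySem.Set.add s) := by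
  induction l generalizing s with
  | nil => rfl
  | cons p l ih =>
    simp only [List.foldl_cons]
    by_cases hc : PySem.Set.contains s p = true
    · have hm : p ∈ s := by simpa using hc
      have hadd : PySem.Set.add s p = s := by unfold PySem.Set.add; simp [hm]
      rw [show updItem (s, s) p = (s, s) by simp [updItem, hm], hadd, ih]
    · have hm : p ∉ s := by simpa using hc
      have hadd : PySem.Set.add s p = s ++ [p] := by unfold PySem.Set.add; simp [hm]
      rw [show updItem (s, s) p = (s ++ [p], PySem.Set.add s p) by simp [updItem, hm], hadd, ih]

theorem wsum_append (s : List Int) (d : Int) : wsum (s ++ [d]) = wsum s + (d + 2) := by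
  simp [wsum]

theorem mem_allT {s : List Int} {t : Nat} :
    s ∈ allT t ↔ (s.length = t ∧ ∀ d ∈ s, d = 0 ∨ d = 1 ∨ d = 2) := by
  induction t generalizing s with
  | zero =>
    simp only [allT, Function.iterate_zero, id, List.mem_singleton]
    constructor
    · rintro rfl; simp
    · rintro ⟨h1, -⟩; exact List.length_eq_zero_iff.mp h1
  | succ t ih =>
    rw [show allT (t+1) = stepN (allT t) from Function.iterate_succ_apply' stepN t [[]]]
    simp only [stepN, List.mem_flatMap]
    constructor
    · rintro ⟨u, hu, hs⟩
      obtain ⟨hl, hd⟩ := ih.mp hu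
      have hcase : s = u ++ [0] ∨ s = u ++ [1] ∨ s = u ++ [2] := by simpa [ext1] using hs
      rcases hcase with rfl | rfl | rfl <;>
        refine ⟨by simp [hl], ?_⟩ <;>
        · intro d hd'
          rcases List.mem_append.mp hd' with h | h
          · exact hd d h
          · simp at h; omega
    · rintro ⟨hl, hd⟩
      have hne : s ≠ [] := by intro h; subst h; simp at hl
      obtain ⟨u, c, rfl⟩ : ∃ u c, s = u ++ [c] :=
        ⟨s.dropLast, s.getLast hne, (List.dropLast_append_getLast hne).symm⟩
      refine ⟨u, ih.mpr ⟨by simpa using hl, fun d hdm => hd d (by simp [hdm])⟩, ?_⟩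
      have hc := hd c (by simp)
      rcases hc with rfl | rfl | rfl <;> simp [ext1]

theorem wsum_le (s : List Int) (h : ∀ d ∈ s, d = 0 ∨ d = 1 ∨ d = 2) :
    wsum s ≤ 4 * s.length := by
  induction s with
  | nil => simp [wsum]
  | cons d s ih =>
    have hd := h d (by simp)
    have ih' := ih (fun e he => h e (by simp [he]))
    simp only [wsum, List.map_cons, List.sum_cons, List.length_cons] at ih' ⊢
    push_cast
    omega

-- ---------- A side: int3, ternary, canon ----------

theorem int3_replicate (n : Nat) : int3 (List.replicate n '2') = 3 ^ n - 1 := by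
  induction n with
  | zero => simp [int3]
  | succ n ih =>
    rw [List.replicate_succ']
    simp only [int3, List.foldl_append, List.foldl_cons, List.foldl_nil] at ih ⊢
    rw [ih]
    have : (('2').toNat : Int) - 48 = 2 := by decide
    rw [this, pow_succ]
    ring

theorem ternaryGo_eq (n : Nat) (acc : List String) :
    ternaryGo n acc = acc ++ (dlsb n).map PySem.Int.toStr := by
  induction n using Nat.strong_induction_on generalizing acc with
  | _ n ih =>
    by_cases h : n = 0
    · subst h; rw [ternaryGo, dlsb]; simp
    · rw [ternaryGo, dlsb, dif_neg h, dif_neg h]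
      rw [ih (n / 3) (Nat.div_lt_self (Nat.pos_of_ne_zero h) (by norm_num))]
      simp

theorem dlsb_digits {n : Nat} : ∀ d ∈ dlsb n, d = 0 ∨ d = 1 ∨ d = 2 := by
  induction n using Nat.strong_induction_on with
  | _ n ih =>
    intro d hd
    by_cases h : n = 0
    · subst h; rw [dlsb] at hd; simp at hd
    · rw [dlsb, dif_neg h] at hd
      rcases List.mem_cons.mp hd with rfl | hd
      · have : n % 3 = 0 ∨ n % 3 = 1 ∨ n % 3 = 2 := by omega
        rcases this with h3 | h3 | h3 <;> simp [h3]
      · exact ih (n / 3) (Nat.div_lt_self (Nat.pos_of_ne_zero h) (by norm_num)) d hd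

theorem dlsb_len {t n : Nat} (h : n < 3 ^ t) : (dlsb n).length ≤ t := by
  induction t generalizing n with
  | zero =>
    have : n = 0 := by simpa using h
    subst this; rw [dlsb]; simp
  | succ t ih =>
    by_cases h0 : n = 0
    · subst h0; rw [dlsb]; simp
    · rw [dlsb, dif_neg h0]
      simp only [List.length_cons]
      have hlt : n / 3 < 3 ^ t := by
        rw [Nat.div_lt_iff_lt_mul (by norm_num)]
        calc n < 3 ^ (t+1) := h
        _ = 3 ^ t * 3 := by ring
      have := ih hlt
      omega

theorem ternary_toList {n : Nat} (h : n ≠ 0) :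
    (ternary n).toList = ((dlsb n).reverse).map digChar := by
  unfold ternary
  rw [if_neg h, ternaryGo_eq]
  simp only [List.nil_append, PySem.Str.toList_join, ← List.map_reverse, List.map_map]
  have hmap : ((dlsb n).reverse.map (String.toList ∘ PySem.Int.toStr)) =
      (dlsb n).reverse.map (fun d => [digChar d]) :=
    List.map_congr_left (fun d hd => by
      rcases dlsb_digits d (List.mem_reverse.mp hd) with rfl | rfl | rfl <;> rfl)
  rw [hmap, show ((dlsb n).reverse.map (fun d => [digChar d])) =
      (((dlsb n).reverse.map digChar).map (fun c => [c])) by rw [List.map_map]; rfl]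
  rw [show ("" : String).toList = [] from rfl]
  exact PySem.Chars.join_nil_singletons _

theorem canon_zero (t : Nat) : canon t 0 = List.replicate t 0 := by
  induction t with
  | zero => rfl
  | succ t ih => simp [canon, ih, List.replicate_succ']

theorem canon_eq_pad {t n : Nat} (h : n < 3 ^ t) :
    canon t n = List.replicate (t - (dlsb n).length) 0 ++ (dlsb n).reverse := by
  induction t generalizing n with
  | zero =>
    have : n = 0 := by simpa using h
    subst this; rw [dlsb]; simp [canon]
  | succ t ih =>
    by_cases h0 : n = 0
    · subst h0; rw [dlsb]; simp [canon_zero]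
    · have hlt : n / 3 < 3 ^ t := by
        rw [Nat.div_lt_iff_lt_mul (by norm_num)]
        calc n < 3 ^ (t+1) := h
        _ = 3 ^ t * 3 := by ring
      have hL := dlsb_len hlt
      have hdn : dlsb n = ((n % 3 : Nat) : Int) :: dlsb (n / 3) := by
        rw [dlsb]; rw [dif_neg h0]
      rw [show canon (t+1) n = canon t (n / 3) ++ [((n % 3 : Nat) : Int)] from rfl, ih hlt, hdn]
      simp only [List.length_cons, List.reverse_cons]
      rw [show t + 1 - ((dlsb (n / 3)).length + 1) = t - (dlsb (n / 3)).length by omega]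
      simp [List.append_assoc]

theorem canon_digits {t n : Nat} : ∀ d ∈ canon t n, d = 0 ∨ d = 1 ∨ d = 2 := by
  induction t generalizing n with
  | zero => intro d hd; simp [canon] at hd
  | succ t ih =>
    intro d hd
    rw [show canon (t+1) n = canon t (n / 3) ++ [((n % 3 : Nat) : Int)] from rfl] at hd
    rcases List.mem_append.mp hd with h | h
    · exact ih d h
    · simp at h
      omega

-- the padded ternary string A builds is exactly the canonical t-digit string of i
theorem binp_eq {t i : Nat} (ht : 1 ≤ t) (hi : i < 3 ^ t) :
    (if ((ternary i).toList.length : Int) < (t : Int) then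
        List.replicate ((t : Int) - ((ternary i).toList.length : Int)).toNat '0' ++ (ternary i).toList
      else (ternary i).toList) = (canon t i).map digChar := by
  by_cases h0 : i = 0
  · subst h0
    have ht0 : (ternary 0).toList = ['0'] := rfl
    rw [ht0, canon_zero]
    simp only [List.length_cons, List.length_nil, List.map_replicate]
    have hd0 : digChar 0 = '0' := rfl
    rw [hd0]
    split_ifs with hlt
    · rw [show ((t : Int) - ((0 + 1 : Nat) : Int)).toNat = t - 1 by push_cast; omega,
        ← List.replicate_succ']
      congr 1
      omega
    · have : t = 1 := by push_cast at hlt; omega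
      subst this; rfl
  · have htl := ternary_toList h0
    have hL := dlsb_len hi
    have hpad := canon_eq_pad hi
    rw [htl, hpad]
    simp only [List.length_map, List.length_reverse, List.map_append, List.map_replicate]
    have hd0 : digChar 0 = '0' := rfl
    rw [hd0]
    split_ifs with hlt
    · congr 1
      congr 1
      omega
    · have : (dlsb i).length = t := by omega
      rw [this]
      simp

theorem range3 (n : Nat) :
    List.range (3 * n) = (List.range n).flatMap (fun q => [3 * q, 3 * q + 1, 3 * q + 2]) := by
  induction n with
  | zero => rfl
  | succ n ih =>
    have h3 : 3 * (n+1) = (3*n + 1 + 1) + 1 := by ring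
    rw [h3, List.range_succ, List.range_succ, List.range_succ, ih, List.range_succ]
    simp [List.flatMap_append, List.append_assoc]

theorem map_range_canon (t : Nat) : (List.range (3 ^ t)).map (canon t) = allT t := by
  induction t with
  | zero => rfl
  | succ t ih =>
    rw [show (3:Nat) ^ (t+1) = 3 * 3 ^ t by ring, range3, List.map_flatMap]
    rw [show allT (t+1) = stepN (allT t) from Function.iterate_succ_apply' stepN t [[]], ← ih]
    rw [stepN, List.flatMap_map]
    apply List.flatMap_congr
    intro q hq
    have e0 : (3 * q) / 3 = q := by omega
    have e1 : (3 * q + 1) / 3 = q := by omega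
    have e2 : (3 * q + 2) / 3 = q := by omega
    simp [canon, ext1, e0, e1, e2]

-- ---------- joins and rendering ----------

theorem joinStr_nil : PySem.Str.join "" ([] : List String) = "" := by
  rfl

theorem joinStr_cons (a : String) (l : List String) :
    PySem.Str.join "" (a :: l) = a ++ PySem.Str.join "" l := by
  rw [← String.toList_inj]
  simp only [PySem.Str.toList_join, List.map_cons, String.toList_append]
  cases l with
  | nil => simp [PySem.Chars.join_singleton, PySem.Chars.join_nil]
  | cons b l =>
    rw [List.map_cons, PySem.Chars.join_cons_cons]
    simp

theorem joinBlocks_nil : joinBlocks [] = "" := by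
  unfold joinBlocks; exact joinStr_nil

theorem joinBlocks_cons (d : Int) (ds : List Int) :
    joinBlocks (d :: ds) = PySem.List.pyGetD ["TLL", "TLLL", "TLLLL"] d "" ++ joinBlocks ds := by
  unfold joinBlocks; rw [List.map_cons, joinStr_cons]

theorem ext1_eq (s : List Int) : ext1 s = [0, 1, 2].map (fun d => s ++ [d]) := rfl

theorem pyR3 : PySem.List.pyRange 0 3 1 = [0, 1, 2] := by decide

theorem render_foldl (ds : List Int) (h : ∀ d ∈ ds, d = 0 ∨ d = 1 ∨ d = 2)
    (s0 : String) (p0 : Int) :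
    (ds.map digChar).foldl (fun (st : String × Int) p =>
        if p = '0' then (st.1 ++ "TLL", st.2 + 2)
        else if p = '1' then (st.1 ++ "TLLL", st.2 + 3)
        else if p = '2' then (st.1 ++ "TLLLL", st.2 + 4)
        else st) (s0, p0) = (s0 ++ joinBlocks ds, p0 + wsum ds) := by
  induction ds generalizing s0 p0 with
  | nil => simp [joinBlocks_nil, wsum]
  | cons d ds ih =>
    have hds := fun e he => h e (List.mem_cons_of_mem _ he)
    simp only [List.map_cons, List.foldl_cons]
    rcases h d (by simp) with rfl | rfl | rfl <;>
      · norm_num [digChar]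
        rw [ih hds, joinBlocks_cons]
        simp [wsum, String.append_assoc,
          show PySem.List.pyGetD ["TLL", "TLLL", "TLLLL"] (0 : Int) "" = "TLL" from rfl,
          show PySem.List.pyGetD ["TLL", "TLLL", "TLLLL"] (1 : Int) "" = "TLLL" from rfl,
          show PySem.List.pyGetD ["TLL", "TLLL", "TLLLL"] (2 : Int) "" = "TLLLL" from rfl]
        try ring

-- ---------- B side: the pruned level loop ----------

theorem bstep_shape (num k : Int) (L : List (List Int)) (acc : List (List Int × Int)) :
    (L.map (pairup num)).foldl (fun nxt dr =>
        (PySem.List.pyRange 0 3 1).foldl (fun nxt d =>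
          if 2 * (k - 1) ≤ dr.2 - (2 + d) ∧ dr.2 - (2 + d) ≤ 4 * (k - 1) then
            nxt ++ [(dr.1 ++ [d], dr.2 - (2 + d))] else nxt) nxt) acc =
      acc ++ ((stepN L).filter (feasB num (k - 1))).map (pairup num) := by
  rw [List.foldl_map, pyR3]
  rw [foldl_app_of_mem _ _ (fun s => ((ext1 s).filter (feasB num (k - 1))).map (pairup num))
    (fun nxt s _ => ?_) acc]
  · rw [show stepN L = L.flatMap ext1 from rfl, List.filter_flatMap, List.map_flatMap]
  · have hb : ∀ d : Int,
        decide (2 * (k - 1) ≤ (pairup num s).2 - (2 + d) ∧ (pairup num s).2 - (2 + d) ≤ 4 * (k - 1)) =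
          feasB num (k - 1) (s ++ [d]) := by
      intro d
      unfold feasB
      rw [decide_eq_decide]
      simp only [pairup, wsum_append]
      constructor <;> intro hh <;> omega
    have hval : ∀ d : Int, ((pairup num s).1 ++ [d], (pairup num s).2 - (2 + d)) =
        pairup num (s ++ [d]) := by
      intro d
      simp only [pairup, wsum_append, Prod.mk.injEq]
      exact ⟨trivial, by ring⟩
    rw [PySem.List.foldl_append_ite
      (fun d : Int => 2 * (k - 1) ≤ (pairup num s).2 - (2 + d) ∧ (pairup num s).2 - (2 + d) ≤ 4 * (k - 1))
      (fun d : Int => ((pairup num s).1 ++ [d], (pairup num s).2 - (2 + d)))]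
    congr 1
    show _ = List.map (pairup num) (List.filter (feasB num (k - 1)) (ext1 s))
    rw [ext1_eq, List.filter_map, List.map_map]
    rw [List.filter_congr (fun d _ => hb d)]
    refine List.map_congr_left (fun d hd => ?_)
    simp only [Function.comp]
    exact hval d

theorem absorb (num : Int) (k : Int) (L : List (List Int)) :
    (stepN (L.filter (feasB num k))).filter (feasB num (k - 1)) =
      (stepN L).filter (feasB num (k - 1)) := by
  induction L with
  | nil => rfl
  | cons s L ih =>
    by_cases hp : feasB num k s = true
    · rw [List.filter_cons_of_pos hp]
      simp only [stepN, List.flatMap_cons, List.filter_append]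
      rw [show (L.filter (feasB num k)).flatMap ext1 = stepN (L.filter (feasB num k)) from rfl,
        show L.flatMap ext1 = stepN L from rfl, ih]
    · rw [List.filter_cons_of_neg hp]
      have hp' : ¬(2 * k ≤ num - wsum s ∧ num - wsum s ≤ 4 * k) := by
        simpa [feasB] using hp
      have hfail : ∀ d : Int, d = 0 ∨ d = 1 ∨ d = 2 → feasB num (k - 1) (s ++ [d]) = false := by
        intro d hd
        simp only [feasB, wsum_append, decide_eq_false_iff_not]
        rcases hd with rfl | rfl | rfl <;> omega
      have hnil : (ext1 s).filter (feasB num (k - 1)) = [] := by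
        rw [ext1_eq]
        simp [List.filter, hfail 0 (by simp), hfail 1 (by simp), hfail 2 (by simp)]
      simp only [stepN, List.flatMap_cons, List.filter_append] at ih ⊢
      rw [hnil, ih]
      simp

theorem loopk (num : Int) (k : Nat) (L : List (List Int)) :
    (PySem.List.pyRange (k : Int) 0 (-1)).foldl (fun level kk =>
        level.foldl (fun nxt dr =>
          (PySem.List.pyRange 0 3 1).foldl (fun nxt d =>
            if 2 * (kk - 1) ≤ dr.2 - (2 + d) ∧ dr.2 - (2 + d) ≤ 4 * (kk - 1) then
              nxt ++ [(dr.1 ++ [d], dr.2 - (2 + d))] else nxt) nxt) [])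
        ((L.filter (feasB num (k : Int))).map (pairup num)) =
      ((stepN^[k] L).filter (feasB num 0)).map (pairup num) := by
  induction k generalizing L with
  | zero =>
    rw [PySem.List.pyRange_neg_one_eq_nil (by norm_num)]
    simp only [List.foldl_nil, Function.iterate_zero, id, Nat.cast_zero]
  | succ k ih =>
    rw [PySem.List.pyRange_neg_one_cons (by push_cast; omega)]
    simp only [List.foldl_cons]
    rw [bstep_shape num ((k + 1 : Nat) : Int) (L.filter (feasB num ((k + 1 : Nat) : Int))) []]
    rw [List.nil_append, absorb num ((k + 1 : Nat) : Int) L]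
    rw [show ((k + 1 : Nat) : Int) - 1 = (k : Int) by push_cast; ring]
    rw [ih (stepN L), ← Function.iterate_succ_apply stepN k L]

theorem feas0 (num : Int) (s : List Int) : feasB num 0 s = decide (wsum s = num) := by
  unfold feasB
  rw [decide_eq_decide]
  omega

theorem level_final (num : Int) (t : Int) (ht : 1 ≤ t) :
    (PySem.List.pyRange t 0 (-1)).foldl (fun level kk =>
        level.foldl (fun nxt dr =>
          (PySem.List.pyRange 0 3 1).foldl (fun nxt d =>
            if 2 * (kk - 1) ≤ dr.2 - (2 + d) ∧ dr.2 - (2 + d) ≤ 4 * (kk - 1) then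
              nxt ++ [(dr.1 ++ [d], dr.2 - (2 + d))] else nxt) nxt) [])
        [([], num)] =
      (gen num t.toNat).map (pairup num) := by
  obtain ⟨k, hk⟩ : ∃ k : Nat, t = ((k : Int) + 1) := ⟨(t - 1).toNat, by omega⟩
  subst hk
  have hinit : [(([] : List Int), num)] = ([[]] : List (List Int)).map (pairup num) := by
    simp [pairup, wsum]
  rw [hinit, PySem.List.pyRange_neg_one_cons (by positivity), List.foldl_cons]
  rw [bstep_shape num ((k : Int) + 1) [[]] [], List.nil_append]
  rw [show ((k : Int) + 1) - 1 = (k : Int) by ring]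
  rw [loopk num k (stepN [[]])]
  rw [← Function.iterate_succ_apply stepN k [[]]]
  unfold gen
  rw [show ((k : Int) + 1).toNat = k + 1 by omega]
  rw [show allT (k + 1) = stepN^[k + 1] [[]] from rfl]
  congr 1
  exact List.filter_congr (fun s _ => feas0 num s)

-- ---------- the two t-ranges generate the same items ----------

theorem flatif {a b : Type} (l : List a) (p : a → Prop) [DecidablePred p] (f : a → b) :
    l.flatMap (fun v => if p v then [f v] else []) =
      (l.filter (fun v => decide (p v))).map f := by
  induction l with
  | nil => rfl
  | cons v l ih =>
    by_cases hv : p v <;> simp [hv, ih]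

theorem truncdiv_eq (a b : Int) (ha : 0 ≤ a) : PySem.Int.truncdiv a b = a / b :=
  Int.tdiv_eq_ediv_of_nonneg ha

theorem gen_eq_nil {num : Int} {t : Nat} (h : 4 * (t : Int) < num) : gen num t = [] := by
  unfold gen
  rw [List.filter_eq_nil_iff]
  intro s hs
  obtain ⟨hl, hd⟩ := mem_allT.mp hs
  have := wsum_le s hd
  rw [hl] at this
  simp only [decide_eq_true_eq]
  omega

theorem ranges_eq (start_p : String) (balls x : Int) (hx : 0 ≤ x) (hxb : x < balls - 2) :
    (PySem.List.pyRange (if PySem.Int.truncdiv (balls - x) 4 = 0 then 1 else PySem.Int.truncdiv (balls - x) 4)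
        (PySem.Int.truncdiv (balls - x) 2 + 1) 1).flatMap
      (fun t => items start_p (balls - x) x t.toNat) = itemsX start_p balls x := by
  have h3 : 3 ≤ balls - x := by omega
  rw [truncdiv_eq _ _ (by omega), truncdiv_eq _ _ (by omega)]
  unfold itemsX
  rw [PySem.Int.floordiv_eq_ediv_of_pos (by norm_num)]
  by_cases h4 : (balls - x) / 4 = 0
  · rw [if_pos h4]
  · rw [if_neg h4]
    have hm1 : (1 : Int) ≤ (balls - x) / 4 := by omega
    have hm2 : (balls - x) / 4 ≤ (balls - x) / 2 + 1 := by omega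
    rw [PySem.List.pyRange_one_append 1 ((balls - x) / 4) ((balls - x) / 2 + 1) (by omega) hm2]
    rw [List.flatMap_append]
    have hpre : (PySem.List.pyRange 1 ((balls - x) / 4) 1).flatMap
        (fun t => items start_p (balls - x) x t.toNat) = [] := by
      refine List.flatMap_eq_nil_iff.mpr (fun t htm => ?_)
      obtain ⟨ht1, ht2⟩ := PySem.List.mem_pyRange_one.mp htm
      unfold items
      rw [gen_eq_nil (show 4 * ((t.toNat : Nat) : Int) < balls - x by
        rw [Int.toNat_of_nonneg (by omega)]; omega)]
      rfl
    rw [hpre, List.nil_append]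

-- ---------- per-(x,t) blocks ----------

theorem A_block (start_p : String) (balls x t : Int) (ht : 1 ≤ t) (pats : List String) :
    (PySem.List.pyRange 0 (int3 (List.replicate t.toNat '2') + 1) 1).foldl (fun pats i =>
        let tern := ternary i.toNat
        let bin_p := tern.toList
        let bin_p := if (bin_p.length : Int) < t then
            List.replicate ((t : Int) - (bin_p.length : Int)).toNat '0' ++ bin_p else bin_p
        let st := bin_p.foldl (fun (st : String × Int) p =>
          if p = '0' then (st.1 ++ "TLL", st.2 + 2)
          else if p = '1' then (st.1 ++ "TLLL", st.2 + 3)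
          else if p = '2' then (st.1 ++ "TLLLL", st.2 + 4)
          else st) (start_p, (0 : Int))
        if st.2 + x = balls then pats ++ [st.1 ++ String.mk (List.replicate x.toNat 'L')] else pats)
      pats = pats ++ items start_p (balls - x) x t.toNat := by
  have htn : (1 : Nat) ≤ t.toNat := by omega
  have hteq : t = ((t.toNat : Nat) : Int) := by omega
  rw [int3_replicate]
  rw [show (3 : Int) ^ t.toNat - 1 + 1 = ((3 ^ t.toNat : Nat) : Int) by push_cast; ring]
  rw [foldl_app_of_mem _ _ (fun i => if wsum (canon t.toNat i.toNat) = balls - x then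
      [itemOf start_p x (canon t.toNat i.toNat)] else []) (fun pats i hi => ?_) pats]
  · congr 1
    rw [PySem.List.pyRange_one, List.flatMap_map]
    simp only [sub_zero, Int.toNat_natCast, zero_add, Int.toNat_natCast]
    rw [flatif _ (fun k => wsum (canon t.toNat k) = balls - x)]
    unfold items gen
    rw [← map_range_canon, List.filter_map, List.map_map]
    rfl
  · obtain ⟨hi0, hi1⟩ := PySem.List.mem_pyRange_one.mp hi
    have hitn : i.toNat < 3 ^ t.toNat := by omega
    dsimp only []
    rw [hteq, binp_eq htn hitn]
    rw [render_foldl _ (fun d hd => canon_digits d hd) start_p 0]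
    simp only [Int.toNat_natCast]
    by_cases hw : wsum (canon t.toNat i.toNat) = balls - x
    · rw [if_pos (by omega), if_pos hw]
      rfl
    · rw [if_neg (by omega), if_neg hw, List.append_nil]

theorem B_block (start_p : String) (num x t : Int) (ht : 1 ≤ t)
    (acc : List String × PySem.Set String) :
    ((gen num t.toNat).map (pairup num)).foldl (fun (acc : List String × PySem.Set String) dr =>
        let pat := start_p ++ PySem.Str.join "" (dr.1.map (fun d =>
          PySem.List.pyGetD ["TLL", "TLLL", "TLLLL"] d "")) ++ String.mk (List.replicate x.toNat 'L')
        if PySem.Set.contains acc.2 pat then acc else (acc.1 ++ [pat], PySem.Set.add acc.2 pat))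
      acc = (items start_p num x t.toNat).foldl updItem acc := by
  rw [List.foldl_map]
  unfold items
  rw [List.foldl_map]
  apply PySem.List.foldl_congr_mem
  intro acc ds _
  rfl

-- ---------- whole-program characterizations ----------

theorem A_eq_dedup_big (t_balls : Int) (start_p : String) :
    new_pats t_balls start_p =
      PySem.List.dedup (big start_p (t_balls - (PySem.Str.count start_p "L" : Int))) := by
  simp only [new_pats]
  congr 1
  rw [foldl_app_of_mem _ _ (fun x => itemsX start_p (t_balls - (PySem.Str.count start_p "L" : Int)) x)
    (fun pats x hx => ?_) []]
  · rw [List.nil_append]; rfl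
  · obtain ⟨hx0, hx1⟩ := PySem.List.mem_pyRange_one.mp hx
    rw [foldl_app_of_mem _ _ (fun t => items start_p (t_balls - (PySem.Str.count start_p "L" : Int) - x) x t.toNat)
      (fun pats t ht => ?_) pats]
    · rw [ranges_eq start_p (t_balls - (PySem.Str.count start_p "L" : Int)) x hx0 (by omega)]
    · obtain ⟨ht0, ht1⟩ := PySem.List.mem_pyRange_one.mp ht
      have ht1' : (1 : Int) ≤ t := by
        by_cases h4 : PySem.Int.truncdiv (t_balls - (PySem.Str.count start_p "L" : Int) - x) 4 = 0
        · rw [if_pos h4] at ht0; omega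
        · rw [if_neg h4] at ht0
          rw [truncdiv_eq _ _ (by omega)] at ht0 h4
          omega
      exact A_block start_p (t_balls - (PySem.Str.count start_p "L" : Int)) x t ht1' pats

theorem B_eq_dedup_big (t_balls : Int) (start_p : String) :
    new_pats_alt t_balls start_p =
      PySem.List.dedup (big start_p (t_balls - (PySem.Str.count start_p "L" : Int))) := by
  simp only [new_pats_alt]
  rw [show (PySem.Set.empty : PySem.Set String) = ([] : List String) from rfl]
  rw [foldl_cat_of_mem _ _
    (fun x => itemsX start_p (t_balls - (PySem.Str.count start_p "L" : Int)) x) updItem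
    (fun acc x hx => ?_) (([] : List String), ([] : PySem.Set String))]
  · rw [show (PySem.List.pyRange 0 (t_balls - (PySem.Str.count start_p "L" : Int) - 2) 1).flatMap
        (fun x => itemsX start_p (t_balls - (PySem.Str.count start_p "L" : Int)) x) =
        big start_p (t_balls - (PySem.Str.count start_p "L" : Int)) from rfl]
    rw [dedup_fold]
    rfl
  · obtain ⟨hx0, hx1⟩ := PySem.List.mem_pyRange_one.mp hx
    rw [foldl_cat_of_mem _ _
      (fun t => items start_p (t_balls - (PySem.Str.count start_p "L" : Int) - x) x t.toNat) updItem
      (fun acc t ht => ?_) acc]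
    · rfl
    · obtain ⟨ht0, ht1⟩ := PySem.List.mem_pyRange_one.mp ht
      rw [level_final (t_balls - (PySem.Str.count start_p "L" : Int) - x) t ht0]
      exact B_block start_p (t_balls - (PySem.Str.count start_p "L" : Int) - x) x t ht0 acc

-- ===== VERDICT (by name: the statement is the Claim_ definition above) =====
theorem new_pats_spec : Claim_equal_new_pats := by
  intro t_balls start_p _
  unfold Spec_new_pats
  rw [A_eq_dedup_big, B_eq_dedup_big]
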